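-- pv_equiv track=rewrite | github.com/Animation12Trade/codility2 | mark.py | solution
-- ===== SOURCE A (Python) =====
-- def solution(S):
--     N = len(S)
--     patches = 0
--     i = 0
--
--     while i < N:
--         if S[i] == 'X':
--             # We encounter a pothole, so we need to apply a patch
--             patches += 1
--             # Skip the next two segments after applying the patch
--             i += 3
--         else:
--             # Move to the next segment
--             i += 1
--
--     return patches
-- ===== SOURCE B (Python) =====
-- def solution(S):
--     patches = 0
--     while True:
--         i = S.find('X')
--         if i == -1:
--             return patches
--         patches += 1
--         S = S[i + 3:]
-- ===== Notes on version B (the rewrite author's own statement) =====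
-- stated objective: faster
-- what changed: Replaces A's per-character index scan with a repeated substring-search loop: locate the next pothole with str.find, count a patch, and truncate the string past the patched region, so no character is inspected in Python-level code.
import Mathlib
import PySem

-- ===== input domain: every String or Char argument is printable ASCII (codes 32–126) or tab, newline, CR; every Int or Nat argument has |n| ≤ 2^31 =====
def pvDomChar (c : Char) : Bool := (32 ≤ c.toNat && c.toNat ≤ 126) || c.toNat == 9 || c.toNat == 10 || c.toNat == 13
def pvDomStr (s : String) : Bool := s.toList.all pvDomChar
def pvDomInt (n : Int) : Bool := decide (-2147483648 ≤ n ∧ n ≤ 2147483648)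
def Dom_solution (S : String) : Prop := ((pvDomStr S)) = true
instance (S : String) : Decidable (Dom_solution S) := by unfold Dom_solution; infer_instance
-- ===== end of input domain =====

-- B replaces A's per-character index scan with a repeated substring-search loop (find the next pothole, count a patch, truncate the string past the patch); measured faster in a timing run; proved equal on all inputs.

-- ===== PORT A =====
-- the while-loop of A, state (patches, i)
def solutionLoop (s : List Char) (N patches i : Int) : Int :=
  if h : i < N then
    if PySem.List.pyGetD s i ' ' = 'X' then
      solutionLoop s N (patches + 1) (i + 3)
    else
      solutionLoop s N patches (i + 1)
  else patches
termination_by (N - i).toNat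
decreasing_by all_goals omega

def solution (S : String) : Int :=
  solutionLoop S.toList (PySem.Str.len S) 0 0

-- ===== PORT B =====
-- termination fact for the B-loop, cited by name in decreasing_by
theorem pvFindShrink (s : List Char) (h : ¬ PySem.Chars.find s ['X'] = -1) :
    (PySem.List.slice s (some (PySem.Chars.find s ['X'] + 3)) none).length < s.length := by
  have hz := PySem.Chars.findFrom_zero s ['X']
  obtain ⟨h0, hpre, -⟩ := PySem.Chars.findFrom_natCast_spec s ['X'] 0 (Nat.zero_le _)
    (by rw [Nat.cast_zero, hz]; exact h)
  rw [Nat.cast_zero, hz] at h0 hpre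
  set i := PySem.Chars.find s ['X'] with hi
  have hlt : i.toNat < s.length := by
    by_contra hge
    have : s.drop i.toNat = [] := List.drop_eq_nil_of_le (by omega)
    rw [this] at hpre
    exact absurd (List.eq_nil_of_prefix_nil hpre) (by simp)
  have hcast : i + 3 = ((i.toNat + 3 : Nat) : Int) := by omega
  rw [hcast, PySem.List.slice_from_natCast, List.length_drop]
  omega

-- the while-loop of B: find the next 'X'; if none, done; else count a patch and cut off S[:i+3]
def altLoop (S : List Char) (patches : Int) : Int :=
  let i := PySem.Chars.find S ['X']
  if h : i = -1 then patches
  else altLoop (PySem.List.slice S (some (i + 3)) none) (patches + 1)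
termination_by S.length
decreasing_by exact pvFindShrink S h

def solution_alt (S : String) : Int := altLoop S.toList 0

-- ===== PRECONDITION & SPEC =====
def Spec_solution (S : String) (out : Int) : Prop := out = solution_alt S
instance (S : String) (out : Int) : Decidable (Spec_solution S out) := by unfold Spec_solution; infer_instance

-- ===== CLAIM (what is proved, stated in full; the proofs are below) =====
def Claim_equal_solution : Prop := ∀ (S : String), Dom_solution S → Spec_solution S (solution S)

-- ===== LEMMAS AND PROOFS =====

-- reference count: patch at the first pothole, then skip the next two segments
def refCount : List Char → Int
  | [] => 0
  | c :: t => if c = 'X' then 1 + refCount (t.drop 2) else refCount t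
termination_by cs => cs.length
decreasing_by all_goals (simp only [List.length_cons, List.length_drop]; omega)

lemma refCount_no_X (s : List Char) (h : ¬ ['X'] <:+: s) : refCount s = 0 := by
  induction hn : s.length using Nat.strong_induction_on generalizing s with
  | _ n ih =>
    cases s with
    | nil => simp [refCount]
    | cons c t =>
      have hc : c ≠ 'X' := by
        intro hc; exact h (List.IsPrefix.isInfix ⟨t, by simp [hc]⟩)
      rw [refCount, if_neg hc]
      exact ih t.length (by simp at hn; omega) t
        (fun hinf => h (hinf.trans (List.suffix_cons c t).isInfix)) rfl

lemma refCount_found (j : Nat) (s : List Char)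
    (hpre : ['X'] <+: s.drop j) (hmin : ∀ k, k < j → ¬ ['X'] <+: s.drop k) :
    refCount s = 1 + refCount (s.drop (j + 3)) := by
  induction j generalizing s with
  | zero =>
    rw [List.drop_zero] at hpre
    obtain ⟨t, ht⟩ := hpre
    rw [List.singleton_append] at ht
    subst ht
    rw [refCount, if_pos rfl]
    simp
  | succ j ih =>
    cases s with
    | nil => simp at hpre
    | cons c t =>
      have hc : c ≠ 'X' := by
        intro hc
        exact hmin 0 (Nat.succ_pos j) (by rw [List.drop_zero, hc]; exact ⟨t, rfl⟩)
      rw [refCount, if_neg hc]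
      rw [List.drop_succ_cons] at hpre
      have := ih t hpre (fun k hk => by
        have := hmin (k + 1) (by omega)
        rwa [List.drop_succ_cons] at this)
      rw [this]
      simp [show j + 1 + 3 = (j + 3) + 1 from rfl]

-- the B-loop computes refCount
lemma altLoop_eq (s : List Char) (p : Int) : altLoop s p = p + refCount s := by
  induction hn : s.length using Nat.strong_induction_on generalizing s p with
  | _ n ih =>
    rw [altLoop]
    by_cases h : PySem.Chars.find s ['X'] = -1
    · rw [dif_pos h, refCount_no_X s ((PySem.Chars.find_eq_neg_one_iff s ['X']).mp h)]
      ring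
    · rw [dif_neg h]
      have hz := PySem.Chars.findFrom_zero s ['X']
      obtain ⟨h0, hpre, hm⟩ := PySem.Chars.findFrom_natCast_spec s ['X'] 0 (Nat.zero_le _)
        (by rw [Nat.cast_zero, hz]; exact h)
      rw [Nat.cast_zero, hz] at h0 hpre hm
      set i := PySem.Chars.find s ['X'] with hi
      have hcast : i + 3 = ((i.toNat + 3 : Nat) : Int) := by omega
      rw [hcast, PySem.List.slice_from_natCast]
      have hshrink := pvFindShrink s h
      rw [hcast, PySem.List.slice_from_natCast] at hshrink
      rw [ih (s.drop (i.toNat + 3)).length (by rw [← hn]; simpa using hshrink)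
        (s.drop (i.toNat + 3)) (p + 1) rfl]
      rw [refCount_found i.toNat s hpre (fun k hk => hm k (Nat.zero_le k) hk)]
      ring

-- A's jump-scan from index i computes refCount of the remaining suffix
lemma solutionLoop_eq (s : List Char) (p i : Int) (h0 : 0 ≤ i) :
    solutionLoop s (s.length : Int) p i = p + refCount (s.drop i.toNat) := by
  induction hn : (s.length - i.toNat) using Nat.strong_induction_on generalizing p i with
  | _ n ih =>
    rw [solutionLoop]
    by_cases hlt : i < (s.length : Int)
    · have hi : i.toNat < s.length := by omega
      have hget : PySem.List.pyGetD s i ' ' = s[i.toNat] :=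
        PySem.List.pyGetD_eq_getElem s ' ' h0 (by exact_mod_cast hlt)
      have hdrop : s.drop i.toNat = s[i.toNat] :: s.drop (i.toNat + 1) :=
        List.drop_eq_getElem_cons hi
      rw [dif_pos hlt, hget]
      by_cases hc : s[i.toNat] = 'X'
      · rw [if_pos hc, ih (s.length - (i + 3).toNat) (by omega) (p + 1) (i + 3) (by omega) rfl]
        rw [hdrop, refCount, if_pos hc]
        have : (s.drop (i.toNat + 1)).drop 2 = s.drop (i + 3).toNat := by
          rw [List.drop_drop]; congr 1; omega
        rw [this]; ring
      · rw [if_neg hc, ih (s.length - (i + 1).toNat) (by omega) p (i + 1) (by omega) rfl]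
        rw [hdrop, refCount, if_neg hc]
        have : i.toNat + 1 = (i + 1).toNat := by omega
        rw [this]
    · rw [dif_neg hlt]
      have he : s.drop i.toNat = [] := List.drop_eq_nil_of_le (by omega)
      rw [he]; simp [refCount]

-- ===== VERDICT (by name: the statement is the Claim_ definition above) =====
theorem solution_spec : Claim_equal_solution := by
  intro S _
  unfold Spec_solution solution solution_alt
  rw [PySem.Str.len_eq, solutionLoop_eq S.toList 0 0 le_rfl, altLoop_eq S.toList 0]
  simp
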